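-- pv_equiv track=rewrite | github.com/caonguyenthanhan/caro | ai_algorithms.py | _score_player_lines
-- ===== SOURCE A (Python) =====
-- PATTERN_SCORES = {
--     "win": 100_000,
--     "open4": 10_000,
--     "blocked4": 1_000,
--     "open3": 1_000,
--     "blocked3": 100,
--     "open2": 100,
-- }
--
-- def _count_overlapping(haystack: str, needle: str) -> int:
--     if not needle:
--         return 0
--     count = 0
--     start = 0
--     while True:
--         idx = haystack.find(needle, start)
--         if idx == -1:
--             return count
--         count += 1
--         start = idx + 1
--
-- def _score_player_lines(lines: list[str], player: int) -> int:
--     p = str(player)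
--     o = str(3 - player)
--
--     win = p * 5
--     open4 = "0" + p * 4 + "0"
--     open3 = "0" + p * 3 + "0"
--     open2 = "0" + p * 2 + "0"
--
--     score = 0
--     for s in lines:
--         if win in s:
--             score += PATTERN_SCORES["win"] * _count_overlapping(s, win)
--
--         score += PATTERN_SCORES["open4"] * _count_overlapping(s, open4)
--         score += PATTERN_SCORES["open3"] * _count_overlapping(s, open3)
--         score += PATTERN_SCORES["open2"] * _count_overlapping(s, open2)
--
--         score += PATTERN_SCORES["blocked4"] * (
--             _count_overlapping(s, o + p * 4 + "0")
--             + _count_overlapping(s, "0" + p * 4 + o)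
--             + (1 if s.startswith(p * 4 + "0") else 0)
--             + (1 if s.endswith("0" + p * 4) else 0)
--         )
--
--         score += PATTERN_SCORES["blocked3"] * (
--             _count_overlapping(s, o + p * 3 + "0")
--             + _count_overlapping(s, "0" + p * 3 + o)
--             + (1 if s.startswith(p * 3 + "0") else 0)
--             + (1 if s.endswith("0" + p * 3) else 0)
--         )
--
--     return score
-- ===== SOURCE B (Python) =====
-- PATTERN_SCORES = {
--     "win": 100_000,
--     "open4": 10_000,
--     "blocked4": 1_000,
--     "open3": 1_000,
--     "blocked3": 100,
--     "open2": 100,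
-- }
--
-- def _score_player_lines(lines: list[str], player: int) -> int:
--     p = str(player)
--     o = str(3 - player)
--     # weight table: every unanchored pattern, matched at every start position
--     pats = [
--         (p * 5, PATTERN_SCORES["win"]),
--         ("0" + p * 4 + "0", PATTERN_SCORES["open4"]),
--         ("0" + p * 3 + "0", PATTERN_SCORES["open3"]),
--         ("0" + p * 2 + "0", PATTERN_SCORES["open2"]),
--         (o + p * 4 + "0", PATTERN_SCORES["blocked4"]),
--         ("0" + p * 4 + o, PATTERN_SCORES["blocked4"]),
--         (o + p * 3 + "0", PATTERN_SCORES["blocked3"]),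
--         ("0" + p * 3 + o, PATTERN_SCORES["blocked3"]),
--     ]
--     total = 0
--     for s in lines:
--         for i in range(len(s)):
--             for pat, w in pats:
--                 if s.startswith(pat, i):
--                     total += w
--         # edge-anchored blocked shapes
--         if s.startswith(p * 4 + "0"):
--             total += PATTERN_SCORES["blocked4"]
--         if s.endswith("0" + p * 4):
--             total += PATTERN_SCORES["blocked4"]
--         if s.startswith(p * 3 + "0"):
--             total += PATTERN_SCORES["blocked3"]
--         if s.endswith("0" + p * 3):
--             total += PATTERN_SCORES["blocked3"]
--     return total
-- ===== Notes on version B (the rewrite author's own statement) =====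
-- stated objective: alternative
-- what changed: Replaces the nine pattern-major scans per line (overlapping str.find loops plus membership/startswith/endswith checks) by one position-major pass: a weight table of the unanchored patterns matched once at every start position, plus the four edge-anchored checks.
import Mathlib
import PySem

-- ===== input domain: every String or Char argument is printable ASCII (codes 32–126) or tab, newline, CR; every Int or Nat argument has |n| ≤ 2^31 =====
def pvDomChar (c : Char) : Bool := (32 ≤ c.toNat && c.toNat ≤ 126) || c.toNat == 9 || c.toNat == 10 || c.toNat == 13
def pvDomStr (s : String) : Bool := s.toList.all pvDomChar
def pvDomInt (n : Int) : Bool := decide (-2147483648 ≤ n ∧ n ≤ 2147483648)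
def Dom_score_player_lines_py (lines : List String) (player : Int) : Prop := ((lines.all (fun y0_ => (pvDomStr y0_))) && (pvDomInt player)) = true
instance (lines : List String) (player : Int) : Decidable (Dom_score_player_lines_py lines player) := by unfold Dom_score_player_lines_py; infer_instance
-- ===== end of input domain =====

-- B replaces A's nine pattern-major find-scans per line by a single position-major pass:
-- one weight table of the unanchored patterns, matched once at every start position,
-- plus the four edge-anchored checks (alternative decomposition, equal on all inputs).

-- ===== PORT A =====

-- the while-True find loop of _count_overlapping; fuel = len(haystack)+1 bounds the
-- iterations (each one moves start at least one past the previous hit)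
def pyCountOverlappingLoop (haystack needle : List Char) : Nat → Int → Int → Int
  | 0, _, count => count
  | fuel+1, start, count =>
    let idx := PySem.Chars.findFrom haystack needle start none
    if idx = -1 then count
    else pyCountOverlappingLoop haystack needle fuel (idx + 1) (count + 1)

def pyCountOverlapping (haystack needle : List Char) : Int :=
  if needle = [] then 0
  else pyCountOverlappingLoop haystack needle (haystack.length + 1) 0 0

-- _score_player_lines; the PATTERN_SCORES constants are inlined at their use sites
def score_player_lines_py (lines : List String) (player : Int) : Int :=
  let p := PySem.Int.toChars player
  let o := PySem.Int.toChars (3 - player)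
  let win := List.flatten (List.replicate 5 p)
  let open4 := '0' :: (List.flatten (List.replicate 4 p) ++ ['0'])
  let open3 := '0' :: (List.flatten (List.replicate 3 p) ++ ['0'])
  let open2 := '0' :: (List.flatten (List.replicate 2 p) ++ ['0'])
  lines.foldl (fun score sStr =>
    let s := sStr.toList
    let score := if PySem.Chars.isIn win s then score + 100000 * pyCountOverlapping s win else score
    let score := score + 10000 * pyCountOverlapping s open4
    let score := score + 1000 * pyCountOverlapping s open3
    let score := score + 100 * pyCountOverlapping s open2
    let score := score + 1000 *
      (pyCountOverlapping s (o ++ (List.flatten (List.replicate 4 p) ++ ['0']))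
       + pyCountOverlapping s ('0' :: (List.flatten (List.replicate 4 p) ++ o))
       + (if PySem.Chars.startswith s (List.flatten (List.replicate 4 p) ++ ['0']) then 1 else 0)
       + (if PySem.Chars.endswith s ('0' :: List.flatten (List.replicate 4 p)) then 1 else 0))
    let score := score + 100 *
      (pyCountOverlapping s (o ++ (List.flatten (List.replicate 3 p) ++ ['0']))
       + pyCountOverlapping s ('0' :: (List.flatten (List.replicate 3 p) ++ o))
       + (if PySem.Chars.startswith s (List.flatten (List.replicate 3 p) ++ ['0']) then 1 else 0)
       + (if PySem.Chars.endswith s ('0' :: List.flatten (List.replicate 3 p)) then 1 else 0))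
    score) 0

-- ===== PORT B =====

def score_player_lines_py_alt (lines : List String) (player : Int) : Int :=
  let p := PySem.Int.toChars player
  let o := PySem.Int.toChars (3 - player)
  let pats : List (List Char × Int) := [
    (List.flatten (List.replicate 5 p), 100000),
    ('0' :: (List.flatten (List.replicate 4 p) ++ ['0']), 10000),
    ('0' :: (List.flatten (List.replicate 3 p) ++ ['0']), 1000),
    ('0' :: (List.flatten (List.replicate 2 p) ++ ['0']), 100),
    (o ++ (List.flatten (List.replicate 4 p) ++ ['0']), 1000),
    ('0' :: (List.flatten (List.replicate 4 p) ++ o), 1000),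
    (o ++ (List.flatten (List.replicate 3 p) ++ ['0']), 100),
    ('0' :: (List.flatten (List.replicate 3 p) ++ o), 100)]
  lines.foldl (fun total sStr =>
    let s := sStr.toList
    -- Python's s.startswith(pat, i) for 0 ≤ i is ported by hand as pat.isPrefixOf (s.drop i)
    -- (exact: a non-negative start slices the tail of s)
    let total := (List.range s.length).foldl (fun tot i =>
        pats.foldl (fun tot pw => if pw.1.isPrefixOf (s.drop i) then tot + pw.2 else tot) tot) total
    let total := if PySem.Chars.startswith s (List.flatten (List.replicate 4 p) ++ ['0']) then total + 1000 else total
    let total := if PySem.Chars.endswith s ('0' :: List.flatten (List.replicate 4 p)) then total + 1000 else total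
    let total := if PySem.Chars.startswith s (List.flatten (List.replicate 3 p) ++ ['0']) then total + 100 else total
    let total := if PySem.Chars.endswith s ('0' :: List.flatten (List.replicate 3 p)) then total + 100 else total
    total) 0

-- ===== PRECONDITION & SPEC =====

def Spec_score_player_lines_py (lines : List String) (player : Int) (out : Int) : Prop := out = score_player_lines_py_alt lines player
instance (lines : List String) (player : Int) (out : Int) : Decidable (Spec_score_player_lines_py lines player out) := by unfold Spec_score_player_lines_py; infer_instance

-- ===== CLAIM (what is proved, stated in full; the proofs are below) =====
def Claim_equal_score_player_lines_py : Prop := ∀ (lines : List String) (player : Int), Dom_score_player_lines_py lines player → Spec_score_player_lines_py lines player (score_player_lines_py lines player)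

-- ===== LEMMAS AND PROOFS =====

-- number of indices i with pat a prefix of s.drop i (pat nonempty ⇒ Python's overlapping count)
def cnt (pat : List Char) : List Char → Int
  | [] => 0
  | c :: t => (if pat <+: (c :: t) then 1 else 0) + cnt pat t

lemma cnt_eq_zero_of_not_infix (pat : List Char) :
    ∀ v : List Char, ¬ pat <:+: v → cnt pat v = 0 := by
  intro v
  induction v with
  | nil => intro _; rfl
  | cons c t ih =>
    intro h
    have h1 : ¬ pat <+: (c :: t) := fun hpre => h hpre.isInfix
    have h2 : ¬ pat <:+: t := fun hin => h (hin.trans (List.suffix_cons c t).isInfix)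
    simp [cnt, h1, ih h2]

lemma cnt_drop_of_no_hit (s pat : List Char) :
    ∀ (d k j : Nat), j = k + d → j ≤ s.length →
      (∀ i, k ≤ i → i < j → ¬ pat <+: s.drop i) →
      cnt pat (s.drop k) = cnt pat (s.drop j) := by
  intro d
  induction d with
  | zero => intro k j hj _ _; rw [hj]; norm_num
  | succ d ih =>
    intro k j hj hjlen hno
    have hk : k < s.length := by omega
    rw [List.drop_eq_getElem_cons hk]
    have hnp : ¬ pat <+: (s[k] :: s.drop (k+1)) := by
      rw [← List.drop_eq_getElem_cons hk]
      exact hno k le_rfl (by omega)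
    rw [cnt, if_neg hnp]
    have := ih (k+1) j (by omega) hjlen (fun i hi1 hi2 => hno i (by omega) hi2)
    omega

lemma covLoop_eq (s pat : List Char) (hp : pat ≠ []) :
    ∀ (fuel k : Nat) (acc : Int), k ≤ s.length → s.length + 1 ≤ fuel + k →
      pyCountOverlappingLoop s pat fuel (k : Int) acc = acc + cnt pat (s.drop k) := by
  intro fuel
  induction fuel with
  | zero => intro k acc h1 h2; omega
  | succ fuel ih =>
    intro k acc hk hfuel
    simp only [pyCountOverlappingLoop]
    by_cases hidx : PySem.Chars.findFrom s pat (k : Int) none = -1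
    · rw [if_pos hidx]
      have hni : ¬ pat <:+: s.drop k :=
        (PySem.Chars.findFrom_natCast_eq_neg_one_iff s pat k hk).mp hidx
      have : cnt pat (s.drop k) = 0 := by
        apply cnt_eq_zero_of_not_infix
        exact hni
      omega
    · rw [if_neg hidx]
      obtain ⟨hle, hpre, hmin⟩ := PySem.Chars.findFrom_natCast_spec s pat k hk hidx
      set idx := PySem.Chars.findFrom s pat k none with hidxdef
      have hidx0 : 0 ≤ idx := le_trans (by exact_mod_cast Int.natCast_nonneg k) hle
      set j := idx.toNat with hjdef
      have hij : idx = (j : Int) := (Int.toNat_of_nonneg hidx0).symm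
      have hkj : k ≤ j := by omega
      have hjlt : j < s.length := by
        rcases hpre with ⟨r, hr⟩
        have : pat.length + r.length = (s.drop j).length := by
          rw [← hr]; simp
        have hplen : 1 ≤ pat.length := by
          cases pat with
          | nil => exact absurd rfl hp
          | cons a b => simp
        simp [List.length_drop] at this
        omega
      have hstep : cnt pat (s.drop k) = 1 + cnt pat (s.drop (j + 1)) := by
        rw [cnt_drop_of_no_hit s pat (j - k) k j (by omega) (by omega)
          (fun i h1 h2 => hmin i h1 h2)]
        rw [List.drop_eq_getElem_cons hjlt, cnt, if_pos (by rw [← List.drop_eq_getElem_cons hjlt]; exact hpre)]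
      rw [hij, show ((j : Int) + 1) = ((j + 1 : Nat) : Int) by push_cast; ring]
      rw [ih (j+1) (acc+1) (by omega) (by omega)]
      omega

lemma pyCountOverlapping_eq_cnt (s pat : List Char) (hp : pat ≠ []) :
    pyCountOverlapping s pat = cnt pat s := by
  rw [pyCountOverlapping, if_neg hp]
  have := covLoop_eq s pat hp (s.length + 1) 0 0 (by omega) (by omega)
  simpa using this

lemma isIn_collapse (s pat : List Char) (hp : pat ≠ []) (score : Int) :
    (if PySem.Chars.isIn pat s then score + 100000 * pyCountOverlapping s pat else score)
      = score + 100000 * cnt pat s := by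
  by_cases h : PySem.Chars.isIn pat s = true
  · rw [if_pos h, pyCountOverlapping_eq_cnt s pat hp]
  · rw [if_neg h]
    have : ¬ pat <:+: s := by
      rw [← PySem.Chars.isIn_iff_infix]
      exact h
    rw [cnt_eq_zero_of_not_infix pat s this]
    ring

lemma toChars_ne_nil (n : Int) : PySem.Int.toChars n ≠ [] := by
  unfold PySem.Int.toChars
  split_ifs
  · simp
  · have : 0 < (Nat.toDigits 10 n.toNat).length := Nat.length_toDigits_pos
    intro h
    rw [h] at this
    simp at this

lemma flatten_replicate_ne_nil (p : List Char) (hp : p ≠ []) (n : Nat) (hn : 1 ≤ n) :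
    List.flatten (List.replicate n p) ≠ [] := by
  cases n with
  | zero => omega
  | succ n =>
    rw [List.replicate_succ, List.flatten_cons]
    simp [hp]

-- the inner pattern-table fold of B, as an additive sum
lemma pats_fold_eq (pats : List (List Char × Int)) (v : List Char) :
    ∀ tot : Int,
      pats.foldl (fun tot pw => if pw.1.isPrefixOf v then tot + pw.2 else tot) tot
        = tot + (pats.map (fun pw => if pw.1 <+: v then pw.2 else 0)).sum := by
  induction pats with
  | nil => intro tot; simp
  | cons pw pats ih =>
    intro tot
    rw [List.foldl_cons, List.map_cons, List.sum_cons]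
    by_cases h : pw.1 <+: v
    · rw [if_pos ((List.isPrefixOf_iff_prefix).mpr h), if_pos h, ih]; ring
    · rw [if_neg (fun hb => h ((List.isPrefixOf_iff_prefix).mp hb)), if_neg h, ih]; ring

lemma foldl_add_sum (g : Nat → Int) :
    ∀ (L : List Nat) (total : Int),
      L.foldl (fun tot i => tot + g i) total = total + (L.map g).sum := by
  intro L
  induction L with
  | nil => intro total; simp
  | cons i L ih => intro total; rw [List.foldl_cons, List.map_cons, List.sum_cons, ih]; ring

-- the positional sum of one pattern's weight is weight * overlapping count
lemma pos_sum_eq_cnt (pat : List Char) (w : Int) :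
    ∀ s : List Char,
      ((List.range s.length).map (fun i => if pat <+: s.drop i then w else 0)).sum
        = w * cnt pat s := by
  intro s
  induction s with
  | nil => simp [cnt]
  | cons c t ih =>
    rw [show (c :: t).length = t.length + 1 from rfl, List.range_succ_eq_map,
      List.map_cons, List.sum_cons, List.map_map]
    have : ((List.range t.length).map ((fun i => if pat <+: (c :: t).drop i then w else 0) ∘ Nat.succ)).sum
        = ((List.range t.length).map (fun i => if pat <+: t.drop i then w else 0)).sum := by
      congr 1
    rw [this, ih, cnt]
    simp only [List.drop_zero]
    split_ifs <;> ring

-- swap the position-major double sum into a pattern-major one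
lemma double_sum_swap (s : List Char) :
    ∀ pats : List (List Char × Int),
      ((List.range s.length).map (fun i =>
          (pats.map (fun pw => if pw.1 <+: s.drop i then pw.2 else 0)).sum)).sum
        = (pats.map (fun pw => pw.2 * cnt pw.1 s)).sum := by
  intro pats
  induction pats with
  | nil => simp
  | cons pw pats ih =>
    simp only [List.map_cons, List.sum_cons]
    have hsplit :
        ((List.range s.length).map (fun i =>
            (if pw.1 <+: s.drop i then pw.2 else 0)
              + (pats.map (fun pw => if pw.1 <+: s.drop i then pw.2 else 0)).sum)).sum
          = ((List.range s.length).map (fun i => if pw.1 <+: s.drop i then pw.2 else 0)).sum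
            + ((List.range s.length).map (fun i =>
                (pats.map (fun pw => if pw.1 <+: s.drop i then pw.2 else 0)).sum)).sum := by
      rw [← List.sum_map_add]
    rw [hsplit, pos_sum_eq_cnt pw.1 pw.2 s, ih]

lemma ite_add_shift (b : Prop) [Decidable b] (x w : Int) :
    (if b then x + w else x) = x + w * (if b then 1 else 0) := by
  split_ifs <;> ring

lemma foldl_addf (F : String → Int) (f : Int → String → Int)
    (hstep : ∀ a s, f a s = a + F s) :
    ∀ (L : List String) (a : Int), L.foldl f a = a + (L.map F).sum := by
  intro L
  induction L with
  | nil => intro a; simp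
  | cons s L ih => intro a; rw [List.foldl_cons, hstep, ih]; simp; ring

-- the common per-line normal form of both programs
def SLine (p o : List Char) (s : List Char) : Int :=
  100000 * cnt (List.flatten (List.replicate 5 p)) s
  + 10000 * cnt ('0' :: (List.flatten (List.replicate 4 p) ++ ['0'])) s
  + 1000 * cnt ('0' :: (List.flatten (List.replicate 3 p) ++ ['0'])) s
  + 100 * cnt ('0' :: (List.flatten (List.replicate 2 p) ++ ['0'])) s
  + 1000 * (cnt (o ++ (List.flatten (List.replicate 4 p) ++ ['0'])) s
      + cnt ('0' :: (List.flatten (List.replicate 4 p) ++ o)) s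
      + (if PySem.Chars.startswith s (List.flatten (List.replicate 4 p) ++ ['0']) then 1 else 0)
      + (if PySem.Chars.endswith s ('0' :: List.flatten (List.replicate 4 p)) then 1 else 0))
  + 100 * (cnt (o ++ (List.flatten (List.replicate 3 p) ++ ['0'])) s
      + cnt ('0' :: (List.flatten (List.replicate 3 p) ++ o)) s
      + (if PySem.Chars.startswith s (List.flatten (List.replicate 3 p) ++ ['0']) then 1 else 0)
      + (if PySem.Chars.endswith s ('0' :: List.flatten (List.replicate 3 p)) then 1 else 0))

lemma stepA_eq (p o : List Char) (hp : p ≠ []) (ho : o ≠ [])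
    (score : Int) (sStr : String) :
    (let s := sStr.toList
     let score := if PySem.Chars.isIn (List.flatten (List.replicate 5 p)) s then score + 100000 * pyCountOverlapping s (List.flatten (List.replicate 5 p)) else score
     let score := score + 10000 * pyCountOverlapping s ('0' :: (List.flatten (List.replicate 4 p) ++ ['0']))
     let score := score + 1000 * pyCountOverlapping s ('0' :: (List.flatten (List.replicate 3 p) ++ ['0']))
     let score := score + 100 * pyCountOverlapping s ('0' :: (List.flatten (List.replicate 2 p) ++ ['0']))
     let score := score + 1000 *
       (pyCountOverlapping s (o ++ (List.flatten (List.replicate 4 p) ++ ['0']))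
        + pyCountOverlapping s ('0' :: (List.flatten (List.replicate 4 p) ++ o))
        + (if PySem.Chars.startswith s (List.flatten (List.replicate 4 p) ++ ['0']) then 1 else 0)
        + (if PySem.Chars.endswith s ('0' :: List.flatten (List.replicate 4 p)) then 1 else 0))
     let score := score + 100 *
       (pyCountOverlapping s (o ++ (List.flatten (List.replicate 3 p) ++ ['0']))
        + pyCountOverlapping s ('0' :: (List.flatten (List.replicate 3 p) ++ o))
        + (if PySem.Chars.startswith s (List.flatten (List.replicate 3 p) ++ ['0']) then 1 else 0)
        + (if PySem.Chars.endswith s ('0' :: List.flatten (List.replicate 3 p)) then 1 else 0))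
     score)
    = score + SLine p o sStr.toList := by
  have hoapp : ∀ l : List Char, o ++ l ≠ [] := by
    cases o with
    | nil => exact absurd rfl ho
    | cons a b => intro l; simp
  simp only [
    pyCountOverlapping_eq_cnt sStr.toList ('0' :: (List.flatten (List.replicate 4 p) ++ ['0'])) (by simp),
    pyCountOverlapping_eq_cnt sStr.toList ('0' :: (List.flatten (List.replicate 3 p) ++ ['0'])) (by simp),
    pyCountOverlapping_eq_cnt sStr.toList ('0' :: (List.flatten (List.replicate 2 p) ++ ['0'])) (by simp),
    pyCountOverlapping_eq_cnt sStr.toList (o ++ (List.flatten (List.replicate 4 p) ++ ['0'])) (hoapp _),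
    pyCountOverlapping_eq_cnt sStr.toList (o ++ (List.flatten (List.replicate 3 p) ++ ['0'])) (hoapp _),
    pyCountOverlapping_eq_cnt sStr.toList ('0' :: (List.flatten (List.replicate 4 p) ++ o)) (by simp),
    pyCountOverlapping_eq_cnt sStr.toList ('0' :: (List.flatten (List.replicate 3 p) ++ o)) (by simp),
    isIn_collapse sStr.toList (List.flatten (List.replicate 5 p)) (flatten_replicate_ne_nil p hp 5 (by omega)) score]
  rw [SLine]
  ring

lemma stepB_eq (p o : List Char) (total : Int) (sStr : String) :
    (let s := sStr.toList
     let total := (List.range s.length).foldl (fun tot i =>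
        ([(List.flatten (List.replicate 5 p), (100000:Int)),
          ('0' :: (List.flatten (List.replicate 4 p) ++ ['0']), 10000),
          ('0' :: (List.flatten (List.replicate 3 p) ++ ['0']), 1000),
          ('0' :: (List.flatten (List.replicate 2 p) ++ ['0']), 100),
          (o ++ (List.flatten (List.replicate 4 p) ++ ['0']), 1000),
          ('0' :: (List.flatten (List.replicate 4 p) ++ o), 1000),
          (o ++ (List.flatten (List.replicate 3 p) ++ ['0']), 100),
          ('0' :: (List.flatten (List.replicate 3 p) ++ o), 100)] : List (List Char × Int)).foldl
            (fun tot pw => if pw.1.isPrefixOf (s.drop i) then tot + pw.2 else tot) tot) total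
     let total := if PySem.Chars.startswith s (List.flatten (List.replicate 4 p) ++ ['0']) then total + 1000 else total
     let total := if PySem.Chars.endswith s ('0' :: List.flatten (List.replicate 4 p)) then total + 1000 else total
     let total := if PySem.Chars.startswith s (List.flatten (List.replicate 3 p) ++ ['0']) then total + 100 else total
     let total := if PySem.Chars.endswith s ('0' :: List.flatten (List.replicate 3 p)) then total + 100 else total
     total)
    = total + SLine p o sStr.toList := by
  simp only [pats_fold_eq, foldl_add_sum, double_sum_swap]
  simp only [ite_add_shift]
  simp only [List.map_cons, List.map_nil, List.sum_cons, List.sum_nil]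
  rw [SLine]
  ring

-- ===== VERDICT (by name: the statement is the Claim_ definition above) =====
theorem score_player_lines_py_spec : Claim_equal_score_player_lines_py := by
  intro lines player _
  unfold Spec_score_player_lines_py
  rw [score_player_lines_py, score_player_lines_py_alt]
  rw [foldl_addf (fun sStr => SLine (PySem.Int.toChars player) (PySem.Int.toChars (3 - player)) sStr.toList) _
      (fun a s => stepA_eq (PySem.Int.toChars player) (PySem.Int.toChars (3 - player))
        (toChars_ne_nil player) (toChars_ne_nil (3 - player)) a s),
    foldl_addf (fun sStr => SLine (PySem.Int.toChars player) (PySem.Int.toChars (3 - player)) sStr.toList) _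
      (fun a s => stepB_eq (PySem.Int.toChars player) (PySem.Int.toChars (3 - player)) a s)]
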